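-- pv_equiv track=rewrite | github.com/JakubKazimierski/PythonPortfolio | Coderbyte_algorithms/Hard/ArrayCouples/ArrayCouples.py | ArrayCouples
-- ===== SOURCE A (Python) =====
-- def ArrayCouples(arr):
--     '''
--     Have the function ArrayCouples(arr)
--     take the arr parameter being passed which
--     will be an array of an even number of positive
--     integers, and determine if each pair of integers,
--     [k, k+1], [k+2, k+3], etc. in the array has a corresponding
--     reversed pair somewhere else in the array.
--
--     For example: if arr is [4, 5, 1, 4, 5, 4, 4, 1] then your program
--     should output the string yes because the first pair 4, 5 has the
--     reversed pair 5, 4 in the array, and the next pair, 1, 4 has the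
--     reversed pair 4, 1 in the array as well. But if the array doesn't
--     contain all pairs with their reversed pairs, then your program
--     should output a string of the integer pairs that are incorrect,
--     in the order that they appear in the array.
--
--     For example: if arr is [6, 2, 2, 6, 5, 14, 14, 1] then your program
--     should output the string 5,14,14,1 with only a comma separating the
--     integers.
--     '''
--
--     pairs_with_id = []
--     pairs = []
--     all_pairs_with_id = []
--     correct_pairs = []
--
--     for elem_id in range(0, len(arr)-1, 2):
--         pairs_with_id.append(([arr[elem_id], arr[elem_id+1]], elem_id))
--         pairs.extend([arr[elem_id], arr[elem_id+1]])
--     for elem_id in range(0, len(arr)-1):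
--         all_pairs_with_id.append(([arr[elem_id], arr[elem_id+1]], elem_id))
--
--
--     for pair in pairs_with_id:
--         for pair_rev in all_pairs_with_id:
--             if pair[1] != pair_rev[1]:
--                 # if pairs starts at different indexes and
--                 # reversed pair is equal one of possible pairs
--                 if pair[0][::-1] == pair_rev[0]:
--                     correct_pairs.extend(pair[0])
--                     break
--
--     output = []
--     for elem in pairs:
--         if elem not in correct_pairs:
--             output.append(elem)
--
--     if len(output) != 0:
--         return ",".join(str(elem) for elem in output)
--
--     return "yes"
-- ===== SOURCE B (Python) =====
-- def ArrayCouples(arr):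
--     # Count every consecutive (overlapping) pair once, then decide each even
--     # pair by a dictionary lookup instead of a quadratic rescan.
--     cnt = {}
--     for i in range(len(arr) - 1):
--         p = (arr[i], arr[i + 1])
--         cnt[p] = cnt.get(p, 0) + 1
--     good = set()
--     for i in range(0, len(arr) - 1, 2):
--         a, b = arr[i], arr[i + 1]
--         need = 2 if a == b else 1
--         if cnt.get((b, a), 0) >= need:
--             good.add(a)
--             good.add(b)
--     out = []
--     for i in range(0, len(arr) - 1, 2):
--         for v in (arr[i], arr[i + 1]):
--             if v not in good:
--                 out.append(str(v))
--     return ",".join(out) if out else "yes"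
-- ===== Notes on version B (the rewrite author's own statement) =====
-- stated objective: faster
-- what changed: B builds one counting dictionary of all consecutive (overlapping) pairs and a set of vindicated values, deciding each even pair by a single counter lookup, instead of A's quadratic rescan of all consecutive pairs for every even pair and list-membership filtering.
import Mathlib
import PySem

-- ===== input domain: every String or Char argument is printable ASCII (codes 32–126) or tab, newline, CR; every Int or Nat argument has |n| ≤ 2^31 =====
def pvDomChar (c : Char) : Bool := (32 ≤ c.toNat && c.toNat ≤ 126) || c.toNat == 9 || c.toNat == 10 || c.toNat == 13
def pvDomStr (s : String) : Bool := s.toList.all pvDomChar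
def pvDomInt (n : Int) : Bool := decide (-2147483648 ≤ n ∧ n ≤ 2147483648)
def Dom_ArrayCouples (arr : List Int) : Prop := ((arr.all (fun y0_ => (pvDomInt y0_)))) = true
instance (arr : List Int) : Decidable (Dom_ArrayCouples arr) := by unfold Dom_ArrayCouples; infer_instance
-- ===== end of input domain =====

-- B replaces A's quadratic rescan of all consecutive pairs per even pair with one
-- counting dictionary of consecutive pairs plus a set of vindicated values (objective: faster).

-- ===== PORT A =====
-- inner `for pair_rev in all_pairs_with_id: ... break` loop of A
def ACInner (pair : List Int × Int) : List (List Int × Int) → List Int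
  | [] => []
  | q :: rest =>
    if pair.2 ≠ q.2 then
      if (PySem.List.slice? pair.1 none none (-1)).getD [] = q.1 then pair.1
      else ACInner pair rest
    else ACInner pair rest

def ArrayCouples (arr : List Int) : String :=
  let n : Int := arr.length
  let pairsWithId := (PySem.List.pyRange 0 (n-1) 2).foldl
      (fun acc i => acc ++ [([PySem.List.pyGetD arr i 0, PySem.List.pyGetD arr (i+1) 0], i)]) []
  let pairs := (PySem.List.pyRange 0 (n-1) 2).foldl
      (fun acc i => acc ++ [PySem.List.pyGetD arr i 0, PySem.List.pyGetD arr (i+1) 0]) []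
  let allPairsWithId := (PySem.List.pyRange 0 (n-1)).foldl
      (fun acc i => acc ++ [([PySem.List.pyGetD arr i 0, PySem.List.pyGetD arr (i+1) 0], i)]) []
  let correctPairs := pairsWithId.foldl (fun acc p => acc ++ ACInner p allPairsWithId) []
  let output := pairs.foldl (fun acc e => if e ∈ correctPairs then acc else acc ++ [e]) []
  if output.length ≠ 0 then PySem.Str.join "," (output.map PySem.Int.toStr) else "yes"

-- ===== PORT B =====
def ArrayCouples_alt (arr : List Int) : String :=
  let n : Int := arr.length
  -- cnt[p] = cnt.get(p, 0) + 1 over every consecutive pair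
  let cnt : PySem.Dict (Int × Int) Int := (PySem.List.pyRange 0 (n-1)).foldl
      (fun d i => d.modify (PySem.List.pyGetD arr i 0, PySem.List.pyGetD arr (i+1) 0) 0 (· + 1))
      PySem.Dict.empty
  let good : PySem.Set Int := (PySem.List.pyRange 0 (n-1) 2).foldl
      (fun g i =>
        let a := PySem.List.pyGetD arr i 0
        let b := PySem.List.pyGetD arr (i+1) 0
        let need : Int := if a = b then 2 else 1
        if cnt.getD (b, a) 0 ≥ need then (g.add a).add b else g)
      PySem.Set.empty
  let out : List String := (PySem.List.pyRange 0 (n-1) 2).foldl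
      (fun acc i =>
        let a := PySem.List.pyGetD arr i 0
        let b := PySem.List.pyGetD arr (i+1) 0
        let acc1 := if a ∈ good then acc else acc ++ [PySem.Int.toStr a]
        if b ∈ good then acc1 else acc1 ++ [PySem.Int.toStr b])
      []
  if out ≠ [] then PySem.Str.join "," out else "yes"

-- ===== PRECONDITION & SPEC =====
def Spec_ArrayCouples (arr : List Int) (out : String) : Prop := out = ArrayCouples_alt arr
instance (arr : List Int) (out : String) : Decidable (Spec_ArrayCouples arr out) := by unfold Spec_ArrayCouples; infer_instance

-- ===== CLAIM (what is proved, stated in full; the proofs are below) =====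
def Claim_equal_ArrayCouples : Prop := ∀ (arr : List Int), Dom_ArrayCouples arr → Spec_ArrayCouples arr (ArrayCouples arr)

-- ===== LEMMAS AND PROOFS =====

-- element i (and i+1) of arr, as both ports read it
def pvG (arr : List Int) (i : Int) : Int := PySem.List.pyGetD arr i 0

-- A's inner-loop success condition at even index i
def pvCondA (arr : List Int) (i : Int) : Bool :=
  (PySem.List.pyRange 0 ((arr.length : Int) - 1)).any
    (fun j => decide (i ≠ j) && decide ((pvG arr j, pvG arr (j+1)) = (pvG arr (i+1), pvG arr i)))

-- B's counter condition at even index i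
def pvCondB (arr : List Int) (i : Int) : Bool :=
  decide ((if pvG arr i = pvG arr (i+1) then (2:Int) else 1) ≤
    (((PySem.List.pyRange 0 ((arr.length : Int) - 1)).map
        (fun j => (pvG arr j, pvG arr (j+1)))).count (pvG arr (i+1), pvG arr i) : Int))

def pvKeep (arr : List Int) (c : Int → Bool) (v : Int) : Bool :=
  !((PySem.List.pyRange 0 ((arr.length : Int) - 1) 2).any
      (fun i => c i && (decide (v = pvG arr i) || decide (v = pvG arr (i+1)))))

def pvOut (arr : List Int) (c : Int → Bool) : List Int :=
  ((PySem.List.pyRange 0 ((arr.length : Int) - 1) 2).flatMap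
      (fun i => [pvG arr i, pvG arr (i+1)])).filter (pvKeep arr c)

def pvRender (arr : List Int) (c : Int → Bool) : String :=
  if (pvOut arr c).length ≠ 0 then PySem.Str.join "," ((pvOut arr c).map PySem.Int.toStr) else "yes"

lemma pv_slice_rev (a b : Int) : (PySem.List.slice? [a,b] none none (-1)).getD [] = [b,a] := by
  simp [PySem.List.slice?, show PySem.List.sliceIndices 2 none none (-1) = (1, -1, -1) from by decide,
        List.range_succ]

lemma mem_ACInner (p : List Int × Int) (L : List (List Int × Int)) (v : Int) :
    v ∈ ACInner p L ↔
      (∃ q ∈ L, p.2 ≠ q.2 ∧ (PySem.List.slice? p.1 none none (-1)).getD [] = q.1) ∧ v ∈ p.1 := by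
  induction L with
  | nil => simp [ACInner]
  | cons q rest ih =>
    simp only [ACInner]
    split_ifs with h1 h2
    · simp [h1, h2]
    · rw [ih]; simp [h1, h2]
    · rw [ih]
      have h1' : p.2 = q.2 := by by_contra hc; exact h1 hc
      simp [h1']

lemma pv_foldl_filter_notmem (c : List Int) (L : List Int) (acc : List Int) :
    L.foldl (fun acc e => if e ∈ c then acc else acc ++ [e]) acc
      = acc ++ L.filter (fun e => !(decide (e ∈ c))) := by
  induction L generalizing acc with
  | nil => simp
  | cons x t ih => simp only [List.foldl_cons, List.filter_cons]
                   by_cases h : x ∈ c <;> simp [ih, h]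

lemma pv_mem_goodFold (arr : List Int) (cnt : PySem.Dict (Int × Int) Int)
    (L : List Int) (acc : PySem.Set Int) (v : Int) :
    v ∈ L.foldl
        (fun g i =>
          if cnt.getD (PySem.List.pyGetD arr (i+1) 0, PySem.List.pyGetD arr i 0) 0 ≥
              (if PySem.List.pyGetD arr i 0 = PySem.List.pyGetD arr (i+1) 0 then (2:Int) else 1)
          then (g.add (PySem.List.pyGetD arr i 0)).add (PySem.List.pyGetD arr (i+1) 0) else g)
        acc ↔
      v ∈ acc ∨ ∃ i ∈ L,
        (cnt.getD (PySem.List.pyGetD arr (i+1) 0, PySem.List.pyGetD arr i 0) 0 ≥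
            (if PySem.List.pyGetD arr i 0 = PySem.List.pyGetD arr (i+1) 0 then (2:Int) else 1)) ∧
        (v = PySem.List.pyGetD arr i 0 ∨ v = PySem.List.pyGetD arr (i+1) 0) := by
  induction L generalizing acc with
  | nil => simp
  | cons x t ih =>
    simp only [List.foldl_cons]
    by_cases h : cnt.getD (PySem.List.pyGetD arr (x+1) 0, PySem.List.pyGetD arr x 0) 0 ≥
        (if PySem.List.pyGetD arr x 0 = PySem.List.pyGetD arr (x+1) 0 then (2:Int) else 1)
    · rw [if_pos h, ih, PySem.Set.mem_add, PySem.Set.mem_add]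
      constructor
      · rintro (((hv | hv) | hv) | ⟨i, hi, hc, hv⟩)
        · exact Or.inl hv
        · exact Or.inr ⟨x, List.mem_cons_self, h, Or.inl hv⟩
        · exact Or.inr ⟨x, List.mem_cons_self, h, Or.inr hv⟩
        · exact Or.inr ⟨i, List.mem_cons_of_mem _ hi, hc, hv⟩
      · rintro (hv | ⟨i, hi, hc, hv⟩)
        · exact Or.inl (Or.inl (Or.inl hv))
        · rcases List.mem_cons.mp hi with rfl | hi
          · rcases hv with hv | hv
            · exact Or.inl (Or.inl (Or.inr hv))
            · exact Or.inl (Or.inr hv)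
          · exact Or.inr ⟨i, hi, hc, hv⟩
    · rw [if_neg h, ih]
      constructor
      · rintro (hv | ⟨i, hi, hc, hv⟩)
        · exact Or.inl hv
        · exact Or.inr ⟨i, List.mem_cons_of_mem _ hi, hc, hv⟩
      · rintro (hv | ⟨i, hi, hc, hv⟩)
        · exact Or.inl hv
        · rcases List.mem_cons.mp hi with rfl | hi
          · exact absurd hc h
          · exact Or.inr ⟨i, hi, hc, hv⟩

lemma pv_outFold (arr : List Int) (good : PySem.Set Int) (L : List Int) (acc : List String) :
    L.foldl
        (fun acc i =>
          if PySem.List.pyGetD arr (i+1) 0 ∈ good then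
            (if PySem.List.pyGetD arr i 0 ∈ good then acc else acc ++ [PySem.Int.toStr (PySem.List.pyGetD arr i 0)])
          else
            (if PySem.List.pyGetD arr i 0 ∈ good then acc else acc ++ [PySem.Int.toStr (PySem.List.pyGetD arr i 0)])
              ++ [PySem.Int.toStr (PySem.List.pyGetD arr (i+1) 0)])
        acc
      = acc ++ (L.flatMap (fun i =>
          ([PySem.List.pyGetD arr i 0, PySem.List.pyGetD arr (i+1) 0].filter
              (fun w => !(decide (w ∈ good)))).map PySem.Int.toStr)) := by
  induction L generalizing acc with
  | nil => simp
  | cons x t ih =>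
    simp only [List.foldl_cons, List.flatMap_cons, ih, List.filter_cons]
    by_cases h1 : PySem.List.pyGetD arr x 0 ∈ good <;>
      by_cases h2 : PySem.List.pyGetD arr (x+1) 0 ∈ good <;>
        simp [h1, h2]

lemma pv_getD_cntFold (arr : List Int) (L : List Int) (q : Int × Int) :
    ((L.foldl
        (fun d i => d.modify (PySem.List.pyGetD arr i 0, PySem.List.pyGetD arr (i+1) 0) 0 (· + 1))
        PySem.Dict.empty : PySem.Dict (Int × Int) Int).getD q 0)
      = ((L.map (fun i => (PySem.List.pyGetD arr i 0, PySem.List.pyGetD arr (i+1) 0))).count q : Int) := by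
  have h1 : (L.map (fun i => (PySem.List.pyGetD arr i 0, PySem.List.pyGetD arr (i+1) 0))).foldl
      (fun (d : PySem.Dict (Int × Int) Int) x => d.modify x 0 (· + 1)) PySem.Dict.empty
      = L.foldl
        (fun d i => d.modify (PySem.List.pyGetD arr i 0, PySem.List.pyGetD arr (i+1) 0) 0 (· + 1))
        PySem.Dict.empty := List.foldl_map
  rw [← h1, PySem.Dict.getD_foldl_modify_add_one]
  simp [PySem.Dict.getD, PySem.Dict.empty, PySem.Dict.get?]

lemma pv_exists_ne_iff_countP (L : List Int) (hnd : L.Nodup) {i : Int} (hi : i ∈ L) (p : Int → Bool) :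
    (∃ j ∈ L, j ≠ i ∧ p j) ↔ (if p i then 2 else 1) ≤ L.countP p := by
  have hperm := List.perm_cons_erase hi
  rw [hperm.countP_eq, List.countP_cons]
  have herase : (∃ j ∈ L, j ≠ i ∧ p j) ↔ ∃ j ∈ L.erase i, p j := by
    constructor
    · rintro ⟨j, hj, hne, hp⟩
      exact ⟨j, (hnd.mem_erase_iff).mpr ⟨hne, hj⟩, hp⟩
    · rintro ⟨j, hj, hp⟩
      obtain ⟨hne, hj'⟩ := (hnd.mem_erase_iff).mp hj
      exact ⟨j, hj', hne, hp⟩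
  rw [herase, ← List.countP_pos_iff]
  by_cases hp : p i <;> simp [hp]

lemma pv_nodup_pyRange_one (a b : Int) : (PySem.List.pyRange a b).Nodup := by
  rw [PySem.List.pyRange_of_pos a b (by norm_num)]
  exact (List.nodup_range).map (fun x y h => by omega)

lemma pv_mem_R2_R1 (arr : List Int) {i : Int}
    (h : i ∈ PySem.List.pyRange 0 ((arr.length : Int) - 1) 2) :
    i ∈ PySem.List.pyRange 0 ((arr.length : Int) - 1) := by
  rw [PySem.List.mem_pyRange_iff_of_pos (by norm_num)] at h ⊢
  exact ⟨h.1, h.2.1, ⟨i, by omega⟩⟩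

lemma pv_cond_iff (arr : List Int) {i : Int}
    (hi : i ∈ PySem.List.pyRange 0 ((arr.length : Int) - 1) 2) :
    pvCondA arr i = pvCondB arr i := by
  have hR1 := pv_mem_R2_R1 arr hi
  have hnd := pv_nodup_pyRange_one 0 ((arr.length : Int) - 1)
  rw [Bool.eq_iff_iff]
  simp only [pvCondA, pvCondB, List.any_eq_true, Bool.and_eq_true, decide_eq_true_eq]
  have hA : (∃ j ∈ PySem.List.pyRange 0 ((arr.length : Int) - 1),
      (i ≠ j ∧ (pvG arr j, pvG arr (j+1)) = (pvG arr (i+1), pvG arr i))) ↔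
      (∃ j ∈ PySem.List.pyRange 0 ((arr.length : Int) - 1),
      j ≠ i ∧ (decide ((pvG arr j, pvG arr (j+1)) = (pvG arr (i+1), pvG arr i)) : Bool)) := by
    simp only [decide_eq_true_eq, ne_comm]
  rw [hA, pv_exists_ne_iff_countP _ hnd hR1]
  have hcount : (((PySem.List.pyRange 0 ((arr.length : Int) - 1)).map
        (fun j => (pvG arr j, pvG arr (j+1)))).count (pvG arr (i+1), pvG arr i))
      = (PySem.List.pyRange 0 ((arr.length : Int) - 1)).countP
          (fun j => decide ((pvG arr j, pvG arr (j+1)) = (pvG arr (i+1), pvG arr i))) := by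
    rw [List.count_eq_countP, List.countP_map]
    exact List.countP_congr (fun a _ => by simp)
  rw [hcount]
  by_cases hab : pvG arr i = pvG arr (i+1)
  · have hpi : ((pvG arr i, pvG arr (i+1)) = (pvG arr (i+1), pvG arr i)) := by
      rw [hab]
    simp only [hab, decide_true, if_pos]
    constructor <;> intro h <;> [exact_mod_cast h; exact_mod_cast h]
  · have hpi : ¬ ((pvG arr i, pvG arr (i+1)) = (pvG arr (i+1), pvG arr i)) := by
      simp [Prod.ext_iff]; intro h1 h2; exact hab h1
    simp only [hab, hpi, decide_false, if_false]
    constructor <;> intro h <;> [exact_mod_cast h; exact_mod_cast h]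

lemma pv_decide_eq_of_iff {P : Prop} [inst : Decidable P] {b : Bool} (h : P ↔ b = true) :
    decide P = b := by
  cases b <;> simp [h]

lemma mem_ACInner_pair (a b i v : Int) (L : List (List Int × Int)) :
    v ∈ ACInner ([a,b], i) L ↔ (∃ q ∈ L, i ≠ q.2 ∧ [b,a] = q.1) ∧ (v = a ∨ v = b) := by
  rw [mem_ACInner]
  simp [pv_slice_rev]

lemma pv_keepA (arr : List Int) (v : Int) :
    (!decide (v ∈ List.flatMap
        (fun p => ACInner p
          (List.map (fun j => ([PySem.List.pyGetD arr j 0, PySem.List.pyGetD arr (j+1) 0], j))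
            (PySem.List.pyRange 0 ((arr.length : Int) - 1))))
        (List.map (fun i => ([PySem.List.pyGetD arr i 0, PySem.List.pyGetD arr (i+1) 0], i))
          (PySem.List.pyRange 0 ((arr.length : Int) - 1) 2))))
      = pvKeep arr (pvCondA arr) v := by
  simp only [pvKeep, pvCondA, pvG]
  congr 1
  apply pv_decide_eq_of_iff
  simp [mem_ACInner_pair]
  constructor <;> rintro ⟨i, hi, ⟨j, hj, hne, h1, h2⟩, hv⟩ <;>
    exact ⟨i, hi, ⟨j, hj, hne, h1.symm, h2.symm⟩, hv⟩

lemma pv_A_char (arr : List Int) : ArrayCouples arr = pvRender arr (pvCondA arr) := by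
  unfold ArrayCouples
  simp only [PySem.List.foldl_append_singleton_eq_map, PySem.List.foldl_append_eq_flatMap,
             List.nil_append]
  rw [pv_foldl_filter_notmem]
  simp only [List.nil_append]
  rw [funext (pv_keepA arr)]
  simp only [pvRender, pvOut, pvG]

lemma pv_keepB (arr : List Int) (cnt : PySem.Dict (Int × Int) Int)
    (hcnt : ∀ q, cnt.getD q 0 = ((((PySem.List.pyRange 0 ((arr.length : Int) - 1)).map
        (fun j => (PySem.List.pyGetD arr j 0, PySem.List.pyGetD arr (j+1) 0))).count q : Int)))
    (v : Int) :
    (!decide (v ∈ (PySem.List.pyRange 0 ((arr.length : Int) - 1) 2).foldl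
        (fun g i =>
          if cnt.getD (PySem.List.pyGetD arr (i+1) 0, PySem.List.pyGetD arr i 0) 0 ≥
              (if PySem.List.pyGetD arr i 0 = PySem.List.pyGetD arr (i+1) 0 then (2:Int) else 1)
          then (g.add (PySem.List.pyGetD arr i 0)).add (PySem.List.pyGetD arr (i+1) 0) else g)
        PySem.Set.empty))
      = pvKeep arr (pvCondB arr) v := by
  simp only [pvKeep, pvCondB, pvG]
  congr 1
  apply pv_decide_eq_of_iff
  rw [pv_mem_goodFold]
  simp [hcnt, PySem.Set.empty, ge_iff_le]
  exact Iff.rfl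

lemma pv_B_char (arr : List Int) : ArrayCouples_alt arr = pvRender arr (pvCondB arr) := by
  unfold ArrayCouples_alt
  simp only []
  rw [pv_outFold]
  rw [← List.map_flatMap, ← List.filter_flatMap]
  rw [funext (pv_keepB arr _ (fun q => pv_getD_cntFold arr _ q))]
  simp only [pvRender, pvOut, pvG, List.nil_append]
  generalize (List.filter (pvKeep arr (pvCondB arr))
      (List.flatMap (fun i => [PySem.List.pyGetD arr i 0, PySem.List.pyGetD arr (i+1) 0])
        (PySem.List.pyRange 0 ((arr.length : Int) - 1) 2))) = fl
  by_cases h : fl = [] <;> simp [h]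

lemma pv_any_congr_mem {α : Type} (l : List α) {p q : α → Bool} (h : ∀ x ∈ l, p x = q x) :
    l.any p = l.any q := by
  induction l with
  | nil => rfl
  | cons x t ih =>
    simp only [List.any_cons, h x List.mem_cons_self,
      ih (fun y hy => h y (List.mem_cons_of_mem _ hy))]

lemma pv_render_congr (arr : List Int) {c d : Int → Bool}
    (h : ∀ i ∈ PySem.List.pyRange 0 ((arr.length : Int) - 1) 2, c i = d i) :
    pvRender arr c = pvRender arr d := by
  have hk : ∀ v, pvKeep arr c v = pvKeep arr d v := by
    intro v
    unfold pvKeep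
    congr 1
    exact pv_any_congr_mem _ (fun i hi => by rw [h i hi])
  have hout : pvOut arr c = pvOut arr d := by
    unfold pvOut
    exact List.filter_congr (fun x _ => hk x)
  unfold pvRender
  rw [hout]

-- ===== VERDICT (by name: the statement is the Claim_ definition above) =====
theorem ArrayCouples_spec : Claim_equal_ArrayCouples := by
  intro arr _
  unfold Spec_ArrayCouples
  rw [pv_A_char, pv_B_char]
  exact pv_render_congr arr (fun i hi => pv_cond_iff arr hi)
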